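-- pv_equiv track=rewrite | github.com/jun-pac/Maze-WGAN-2020 | mazeGen.py | show_path
-- ===== SOURCE A (Python) =====
-- def show_path(table, path, start_x, end_x):
--   n=len(table)
--   W=[255,255,255]
--   B=[0,0,0]
--   P=[255,0,0]
--   im=[]
--   im.append([])
--   [im[0].append(B) for i in range(start_x+1)]
--   im[0].append(P)
--   [im[0].append(B) for i in range(n-start_x)]
--   for i in range(n):
--     im.append([B])
--     for j in range(n):
--       if table[i][j]:
--         if path[i][j]:
--           im[i+1].append(P)
--         else:
--           im[i+1].append(W)
--       else:
--         im[i+1].append(B)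
--     im[i+1].append(B)
--   im.append([])
--   [im[n+1].append(B) for i in range(end_x+1)]
--   im[n+1].append(P)
--   [im[n+1].append(B) for i in range(n-end_x)]
--
--   return im
-- ===== SOURCE B (Python) =====
-- def show_path(table, path, start_x, end_x):
--     n = len(table)
--     B = [0, 0, 0]
--     W = [255, 255, 255]
--     P = [255, 0, 0]
--     # sparse overlay: index every non-black interior pixel by its (row, col) coordinate
--     marks = {}
--     for i, trow in enumerate(table):
--         for j in range(n):
--             if trow[j]:
--                 marks[(i + 1, j + 1)] = P if path[i][j] else W
--     # render the interior purely from the index; border marker rows by replication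
--     body = [[marks.get((i, j), B) for j in range(n + 2)] for i in range(1, n + 1)]
--     top = [B] * (start_x + 1) + [P] + [B] * (n - start_x)
--     bottom = [B] * (end_x + 1) + [P] + [B] * (n - end_x)
--     return [top] + body + [bottom]
-- ===== Notes on version B (the rewrite author's own statement) =====
-- stated objective: alternative
-- what changed: B builds a sparse hash index (dict keyed by (row,col)) of the non-black interior pixels in one pass and then renders the whole interior purely by dict lookup with black as the default, with the border marker rows made by list replication, instead of A's per-cell three-way classification appending pixel by pixel.
import Mathlib
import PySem

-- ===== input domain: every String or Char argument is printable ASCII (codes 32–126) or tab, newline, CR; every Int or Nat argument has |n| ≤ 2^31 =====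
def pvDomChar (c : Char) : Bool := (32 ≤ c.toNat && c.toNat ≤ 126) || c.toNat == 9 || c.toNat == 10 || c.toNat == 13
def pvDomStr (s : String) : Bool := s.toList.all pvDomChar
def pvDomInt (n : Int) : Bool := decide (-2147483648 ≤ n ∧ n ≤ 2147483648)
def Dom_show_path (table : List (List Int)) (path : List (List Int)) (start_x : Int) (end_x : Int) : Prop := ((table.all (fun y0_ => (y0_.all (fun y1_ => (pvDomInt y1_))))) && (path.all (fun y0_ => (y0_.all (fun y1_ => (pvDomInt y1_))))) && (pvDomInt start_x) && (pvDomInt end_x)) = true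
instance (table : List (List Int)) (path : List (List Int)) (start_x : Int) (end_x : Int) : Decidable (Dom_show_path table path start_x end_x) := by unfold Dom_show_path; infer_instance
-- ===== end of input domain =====

-- B indexes the non-black interior pixels in a dict keyed by (row, col) and renders the
-- interior purely by dict lookup (black default); border rows by replication. Alternative
-- decomposition, same cost.


def pvB : List Int := [0, 0, 0]
def pvW : List Int := [255, 255, 255]
def pvP : List Int := [255, 0, 0]

-- ===== PORT A =====
def show_path (table : List (List Int)) (path : List (List Int)) (start_x : Int) (end_x : Int) : List (List (List Int)) :=
  let n : Int := table.length
  let row0 : List (List Int) :=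
    ((PySem.List.pyRange 0 (start_x + 1) 1).foldl (fun a _ => a ++ [pvB]) []) ++ [pvP] ++
    ((PySem.List.pyRange 0 (n - start_x) 1).foldl (fun a _ => a ++ [pvB]) [])
  let mid : List (List (List Int)) :=
    (PySem.List.pyRange 0 n 1).foldl (fun acc i =>
      acc ++ [ ((PySem.List.pyRange 0 n 1).foldl (fun row j =>
                  if PySem.List.pyGetD (PySem.List.pyGetD table i []) j 0 ≠ 0 then
                    if PySem.List.pyGetD (PySem.List.pyGetD path i []) j 0 ≠ 0 then
                      row ++ [pvP]
                    else
                      row ++ [pvW]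
                  else
                    row ++ [pvB]) [pvB]) ++ [pvB] ]) []
  let rowN : List (List Int) :=
    ((PySem.List.pyRange 0 (end_x + 1) 1).foldl (fun a _ => a ++ [pvB]) []) ++ [pvP] ++
    ((PySem.List.pyRange 0 (n - end_x) 1).foldl (fun a _ => a ++ [pvB]) [])
  [row0] ++ mid ++ [rowN]

-- ===== PORT B =====
-- the dict of non-black interior pixels, keyed by image coordinates (i+1, j+1)
def pvMarks (table path : List (List Int)) (n : Int) : PySem.Dict (Int × Int) (List Int) :=
  (PySem.List.enumerate table).foldl (fun d it =>
    (PySem.List.pyRange 0 n 1).foldl (fun d j =>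
      if PySem.List.pyGetD it.2 j 0 ≠ 0 then
        d.insert (it.1 + 1, j + 1)
          (if PySem.List.pyGetD (PySem.List.pyGetD path it.1 []) j 0 ≠ 0 then pvP else pvW)
      else d) d) PySem.Dict.empty

def pvMarkerRow (n x : Int) : List (List Int) :=
  List.replicate (x + 1).toNat pvB ++ [pvP] ++ List.replicate (n - x).toNat pvB

def show_path_alt (table : List (List Int)) (path : List (List Int)) (start_x : Int) (end_x : Int) : List (List (List Int)) :=
  let n : Int := table.length
  let marks := pvMarks table path n
  let body : List (List (List Int)) :=
    (PySem.List.pyRange 1 (n + 1) 1).map (fun i =>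
      (PySem.List.pyRange 0 (n + 2) 1).map (fun j => marks.getD (i, j) pvB))
  [pvMarkerRow n start_x] ++ body ++ [pvMarkerRow n end_x]

-- ===== PRECONDITION & SPEC =====
-- Exactly the inputs where Python A returns (no IndexError): every row of table is at least
-- n = len(table) long, and path[i][j] exists wherever the loop reads it (table[i][j] truthy).
def Pre_show_path (table : List (List Int)) (path : List (List Int)) (start_x : Int) (end_x : Int) : Prop :=
  (∀ row ∈ table, table.length ≤ row.length) ∧
  (∀ i < table.length, ∀ j < table.length,
    (table.getD i []).getD j 0 ≠ 0 → i < path.length ∧ j < (path.getD i []).length)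
instance (table : List (List Int)) (path : List (List Int)) (start_x : Int) (end_x : Int) : Decidable (Pre_show_path table path start_x end_x) := by unfold Pre_show_path; infer_instance

def pvWitness_show_path : List (List Int) × List (List Int) × Int × Int :=
  ([[1, 0], [0, 1]], [[1, 0], [0, 0]], 0, 1)

def Spec_show_path (table : List (List Int)) (path : List (List Int)) (start_x : Int) (end_x : Int) (out : List (List (List Int))) : Prop := out = show_path_alt table path start_x end_x
instance (table : List (List Int)) (path : List (List Int)) (start_x : Int) (end_x : Int) (out : List (List (List Int))) : Decidable (Spec_show_path table path start_x end_x out) := by unfold Spec_show_path; infer_instance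

-- ===== CLAIM (what is proved, stated in full; the proofs are below) =====
def Claim_equal_show_path : Prop := ∀ (table : List (List Int)) (path : List (List Int)) (start_x : Int) (end_x : Int), Dom_show_path table path start_x end_x → Pre_show_path table path start_x end_x → Spec_show_path table path start_x end_x (show_path table path start_x end_x)

-- ===== LEMMAS AND PROOFS =====

-- the colour A's classifier gives cell (i, j) of the maze (0-based)
def pvCell (trow prow : List Int) (j : Int) : List Int :=
  if PySem.List.pyGetD trow j 0 ≠ 0 then
    (if PySem.List.pyGetD prow j 0 ≠ 0 then pvP else pvW)
  else pvB

lemma pv_border_eq (n x : Int) :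
    ((PySem.List.pyRange 0 (x + 1) 1).foldl (fun a _ => a ++ [pvB]) []) ++ [pvP] ++
      ((PySem.List.pyRange 0 (n - x) 1).foldl (fun a _ => a ++ [pvB]) []) = pvMarkerRow n x := by
  unfold pvMarkerRow
  rw [PySem.List.foldl_append_singleton_eq_map, PySem.List.foldl_append_singleton_eq_map]
  simp [List.map_const', PySem.List.length_pyRange_one]

-- lookup through B's inner insert loop (one maze row, image row key r, cell value v)
lemma pv_inner_getD (v : Int → List Int) (r : Int) (trow : List Int) :
    ∀ (jr : List Int) (d : PySem.Dict (Int × Int) (List Int)) (i j : Int),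
    (jr.foldl (fun d jj =>
        if PySem.List.pyGetD trow jj 0 ≠ 0 then d.insert (r, jj + 1) (v jj) else d) d).getD (i, j) pvB =
      if i = r ∧ (j - 1) ∈ jr ∧ PySem.List.pyGetD trow (j - 1) 0 ≠ 0 then v (j - 1)
      else d.getD (i, j) pvB := by
  intro jr
  induction jr with
  | nil => intro d i j; simp
  | cons jj rest ih =>
      intro d i j
      rw [List.foldl_cons, ih]
      simp only [List.mem_cons]
      by_cases h1 : i = r ∧ j - 1 ∈ rest ∧ PySem.List.pyGetD trow (j - 1) 0 ≠ 0
      · rw [if_pos (⟨h1.1, Or.inr h1.2.1, h1.2.2⟩ :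
          i = r ∧ (j - 1 = jj ∨ j - 1 ∈ rest) ∧ PySem.List.pyGetD trow (j - 1) 0 ≠ 0),
          if_pos h1]
      · rw [if_neg h1]
        by_cases hT : PySem.List.pyGetD trow jj 0 ≠ 0
        · rw [if_pos hT, PySem.Dict.getD_insert]
          by_cases hk : ((i, j) : Int × Int) = (r, jj + 1)
          · have hi : i = r := congrArg Prod.fst hk
            have hj2 : j = jj + 1 := congrArg Prod.snd hk
            have hj : j - 1 = jj := by omega
            rw [if_pos hk, if_pos (⟨hi, Or.inl hj, by rw [hj]; exact hT⟩ :
              i = r ∧ (j - 1 = jj ∨ j - 1 ∈ rest) ∧ PySem.List.pyGetD trow (j - 1) 0 ≠ 0), hj]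
          · rw [if_neg hk, if_neg]
            rintro ⟨hi, hjm, hTj⟩
            rcases hjm with hj | hj
            · exact hk (by rw [hi, show j = jj + 1 from by omega])
            · exact h1 ⟨hi, hj, hTj⟩
        · rw [if_neg hT, if_neg]
          rintro ⟨hi, hjm, hTj⟩
          rcases hjm with hj | hj
          · exact hT (hj ▸ hTj)
          · exact h1 ⟨hi, hj, hTj⟩

-- lookup through B's whole build loop over the (suffix of the) table
lemma pv_outer_getD (path : List (List Int)) (n : Int) :
    ∀ (ts : List (List Int)) (s : Int) (d : PySem.Dict (Int × Int) (List Int)) (i j : Int),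
    ((PySem.List.enumerate ts s).foldl (fun d it =>
        (PySem.List.pyRange 0 n 1).foldl (fun d jj =>
          if PySem.List.pyGetD it.2 jj 0 ≠ 0 then
            d.insert (it.1 + 1, jj + 1)
              (if PySem.List.pyGetD (PySem.List.pyGetD path it.1 []) jj 0 ≠ 0 then pvP else pvW)
          else d) d) d).getD (i, j) pvB =
      if s + 1 ≤ i ∧ i ≤ s + ts.length ∧ 1 ≤ j ∧ j ≤ n ∧
          PySem.List.pyGetD (PySem.List.pyGetD ts (i - 1 - s) []) (j - 1) 0 ≠ 0 then
        (if PySem.List.pyGetD (PySem.List.pyGetD path (i - 1) []) (j - 1) 0 ≠ 0 then pvP else pvW)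
      else d.getD (i, j) pvB := by
  intro ts
  induction ts with
  | nil =>
      intro s d i j
      rw [PySem.List.enumerate_nil, List.foldl_nil, if_neg]
      rintro ⟨h1, h2, -⟩
      simp only [List.length_nil, Nat.cast_zero, add_zero] at h2
      omega
  | cons t rest ih =>
      intro s d i j
      rw [PySem.List.enumerate_cons, List.foldl_cons, ih,
        pv_inner_getD (fun jj => if PySem.List.pyGetD (PySem.List.pyGetD path (s, t).1 []) jj 0 ≠ 0 then pvP else pvW)
          ((s, t).1 + 1) (s, t).2 (PySem.List.pyRange 0 n 1) d i j]
      simp only [List.length_cons, Nat.cast_add, Nat.cast_one]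
      by_cases hi1 : i = s + 1
      · subst hi1
        rw [if_neg (by rintro ⟨h, -⟩; omega)]
        simp only [PySem.List.mem_pyRange_one]
        rw [show (s : Int) + 1 - 1 - s = 0 from by ring, PySem.List.pyGetD_zero_cons,
          show (s : Int) + 1 - 1 = s from by ring]
        refine if_congr ?_ rfl rfl
        constructor
        · rintro ⟨-, ⟨hj0, hjn⟩, hA⟩
          exact ⟨by omega, by omega, by omega, by omega, hA⟩
        · rintro ⟨-, -, hj1, hjn, hA⟩
          exact ⟨trivial, ⟨by omega, by omega⟩, hA⟩
      · have hin : ¬ (i = ((s, t) : Int × List Int).1 + 1 ∧ (j - 1) ∈ PySem.List.pyRange 0 n 1 ∧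
            PySem.List.pyGetD ((s, t) : Int × List Int).2 (j - 1) 0 ≠ 0) := fun h => hi1 h.1
        rw [if_neg hin]
        by_cases hb : s + 1 + 1 ≤ i ∧ i ≤ s + 1 + (rest.length : Int)
        · have hg : PySem.List.pyGetD (t :: rest) (i - 1 - s) ([] : List Int) =
              PySem.List.pyGetD rest (i - 1 - (s + 1)) [] := by
            rw [PySem.List.pyGetD_eq_getElem (t :: rest) [] (by omega)
                  (by simp only [List.length_cons]; push_cast; omega),
                PySem.List.pyGetD_eq_getElem rest [] (by omega) (by exact_mod_cast (by omega : i - 1 - (s+1) < (rest.length : Int)))]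
            have hk : (i - 1 - s).toNat = (i - 1 - (s + 1)).toNat + 1 := by omega
            simp [hk]
          rw [hg]
          refine if_congr ?_ rfl rfl
          constructor
          · rintro ⟨-, -, h3, h4, hA⟩; exact ⟨by omega, by omega, h3, h4, hA⟩
          · rintro ⟨-, -, h3, h4, hA⟩; exact ⟨by omega, by omega, h3, h4, hA⟩
        · rw [if_neg (by rintro ⟨h1, h2, -⟩; exact hb ⟨h1, h2⟩),
            if_neg (by rintro ⟨h1, h2, -⟩; exact hb ⟨by omega, by omega⟩)]

-- the pixel B's rendering reads at image coordinate (i, j)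
lemma pv_marks_getD (table path : List (List Int)) (i j : Int) :
    (pvMarks table path table.length).getD (i, j) pvB =
      if 1 ≤ i ∧ i ≤ (table.length : Int) ∧ 1 ≤ j ∧ j ≤ (table.length : Int) then
        pvCell (PySem.List.pyGetD table (i - 1) []) (PySem.List.pyGetD path (i - 1) []) (j - 1)
      else pvB := by
  unfold pvMarks
  rw [pv_outer_getD path (table.length : Int) table 0 PySem.Dict.empty i j, PySem.Dict.getD_empty]
  simp only [zero_add, sub_zero]
  unfold pvCell
  by_cases hb : 1 ≤ i ∧ i ≤ (table.length : Int) ∧ 1 ≤ j ∧ j ≤ (table.length : Int)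
  · by_cases hT : PySem.List.pyGetD (PySem.List.pyGetD table (i - 1) []) (j - 1) 0 ≠ 0
    · rw [if_pos ⟨hb.1, hb.2.1, hb.2.2.1, hb.2.2.2, hT⟩, if_pos hb, if_pos hT]
    · rw [if_neg (by rintro ⟨-, -, -, -, hA⟩; exact hT hA), if_pos hb, if_neg hT]
  · rw [if_neg (by rintro ⟨h1, h2, h3, h4, -⟩; exact hb ⟨h1, h2, h3, h4⟩), if_neg hb]

-- A's classify-append row i (0-based) equals B's rendered image row i+1
lemma pv_row_eq (table path : List (List Int)) (i : Int) (h0 : 0 ≤ i)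
    (h1 : i < (table.length : Int)) :
    ((PySem.List.pyRange 0 (table.length : Int) 1).foldl (fun row j =>
        if PySem.List.pyGetD (PySem.List.pyGetD table i []) j 0 ≠ 0 then
          if PySem.List.pyGetD (PySem.List.pyGetD path i []) j 0 ≠ 0 then row ++ [pvP]
          else row ++ [pvW]
        else row ++ [pvB]) [pvB]) ++ [pvB] =
      (PySem.List.pyRange 0 ((table.length : Int) + 2) 1).map
        (fun j => (pvMarks table path table.length).getD (i + 1, j) pvB) := by
  have hstep : (fun (row : List (List Int)) (j : Int) =>
      if PySem.List.pyGetD (PySem.List.pyGetD table i []) j 0 ≠ 0 then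
        if PySem.List.pyGetD (PySem.List.pyGetD path i []) j 0 ≠ 0 then row ++ [pvP]
        else row ++ [pvW]
      else row ++ [pvB]) =
      fun row j => row ++ [pvCell (PySem.List.pyGetD table i []) (PySem.List.pyGetD path i []) j] := by
    funext row j; unfold pvCell; split_ifs <;> rfl
  rw [hstep, PySem.List.foldl_append_singleton_eq_map]
  simp only [pv_marks_getD, show (i : Int) + 1 - 1 = i from by ring]
  conv_rhs => rw [show ((table.length : Int) + 2) = ((table.length : Int) + 1) + 1 from by ring,
    PySem.List.pyRange_one_succ_right (by omega), PySem.List.pyRange_one_cons (by omega)]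
  simp only [List.map_cons, List.map_append]
  rw [if_neg (by rintro ⟨-, -, h, -⟩; omega), if_neg (by rintro ⟨-, -, -, h⟩; omega)]
  simp only [List.cons_append, List.nil_append]
  congr 1
  rw [PySem.List.pyRange_one 0 (table.length : Int)]
  simp only [zero_add, sub_zero, List.map_nil, Int.toNat_natCast]
  rw [PySem.List.pyRange_one 1 ((table.length : Int) + 1), List.map_map, List.map_map,
    show ((table.length : Int) + 1 - 1).toNat = table.length from by omega]
  congr 1
  apply List.map_congr_left
  intro k hk
  have hkN : (k : Int) < (table.length : Int) := by
    simp only [List.mem_range] at hk; omega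
  simp only [Function.comp_apply]
  rw [if_pos ⟨by omega, by omega, by omega, by omega⟩]
  congr 1; omega

-- ===== VERDICT (by name: the statement is the Claim_ definition above) =====
theorem show_path_spec : Claim_equal_show_path := by
  intro table path start_x end_x _ _
  unfold Spec_show_path show_path show_path_alt
  dsimp only
  rw [pv_border_eq, pv_border_eq, PySem.List.foldl_append_singleton_eq_map]
  congr 1
  congr 1
  have hsh : PySem.List.pyRange 1 ((table.length : Int) + 1) 1 =
      (PySem.List.pyRange 0 (table.length : Int) 1).map (fun x => x + 1) := by
    rw [PySem.List.pyRange_one 1 ((table.length : Int) + 1),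
      PySem.List.pyRange_one 0 (table.length : Int), List.map_map,
      show ((table.length : Int) + 1 - 1).toNat = ((table.length : Int) - 0).toNat from by omega]
    apply List.map_congr_left
    intro k _
    simp only [Function.comp_apply]
    ring
  rw [hsh, List.map_map]
  apply List.map_congr_left
  intro x hx
  obtain ⟨hx0, hxN⟩ := PySem.List.mem_pyRange_one.mp hx
  simp only [Function.comp_apply]
  exact pv_row_eq table path x hx0 hxN
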